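-- pv_equiv track=rewrite | github.com/pannous/hieros | scripts/transcribe-elamite.py | transcribe_text
-- ===== SOURCE A (Python) =====
-- def transcribe_text(text, mapping):
--     transcribed_text = ''
--     i = 0
--     while i < len(text):
--         # Check for multi-letter keys (up to 2 letters for this problem)
--         if text[i:i+2] in mapping:
--             transcribed_text += mapping[text[i:i+2]]
--             i += 2
--         elif text[i] in mapping:
--             transcribed_text += mapping[text[i]]
--             i += 1
--         else:
--             transcribed_text += text[i]  # Keep the original character if not in mapping
--             i += 1
--     return transcribed_text
-- ===== SOURCE B (Python) =====
-- def transcribe_text(text, mapping):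
--     # Precompute length-partitioned lookup tables, then a per-position decision
--     # table (piece, step), then a simple walk that joins the chosen pieces.
--     twos = {k: v for k, v in mapping.items() if len(k) == 2}
--     ones = {k: v for k, v in mapping.items() if len(k) == 1}
--     n = len(text)
--     steps = []
--     for i in range(n):
--         v = twos.get(text[i:i+2])
--         steps.append((v, 2) if v is not None else (ones.get(text[i], text[i]), 1))
--     out = []
--     i = 0
--     while i < n:
--         piece, step = steps[i]
--         out.append(piece)
--         i += step
--     return ''.join(out)
-- ===== Notes on version B (the rewrite author's own statement) =====
-- stated objective: faster
-- what changed: A's single greedy while-loop with quadratic string += over the whole mapping is replaced by length-partitioned key dicts, a precomputed per-position (piece, step) decision table, and a walk that ''.joins the chosen pieces.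
import Mathlib
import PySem

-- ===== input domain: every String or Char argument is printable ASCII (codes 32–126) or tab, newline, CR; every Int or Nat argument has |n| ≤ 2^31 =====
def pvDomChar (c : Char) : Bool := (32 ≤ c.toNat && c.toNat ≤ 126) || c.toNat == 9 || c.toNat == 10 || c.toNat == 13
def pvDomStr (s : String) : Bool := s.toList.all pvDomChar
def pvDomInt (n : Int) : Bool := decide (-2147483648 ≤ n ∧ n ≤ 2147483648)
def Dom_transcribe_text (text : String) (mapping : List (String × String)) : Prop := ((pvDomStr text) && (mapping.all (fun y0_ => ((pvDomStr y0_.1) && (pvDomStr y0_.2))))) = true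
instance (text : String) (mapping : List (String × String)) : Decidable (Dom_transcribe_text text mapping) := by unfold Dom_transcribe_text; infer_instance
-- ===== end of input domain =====

-- B replaces A's inline greedy while-loop by a precomputed per-position decision
-- table over length-partitioned key dicts, followed by a walk that joins the
-- chosen pieces (''.join instead of quadratic +=; measured faster; same return value).

-- ===== PORT A =====
-- A's while-loop over index i, ported as recursion on the remaining characters
-- (text[i:i+2] = first two remaining chars, text[i] = head); the Python
-- 'in mapping' + 'mapping[...]' pair is ported as one Dict.get? match
-- (exact: contains ↔ get?.isSome on a PySem.Dict); the string accumulator is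
-- a List Char, converted by String.ofList at the end (exact for '+=').
def pvGoA (d : PySem.Dict String String) : List Char → List Char → List Char
  | acc, [] => acc
  | acc, c :: rest =>
      match d.get? (String.ofList (c :: rest.take 1)) with
      | some v => pvGoA d (acc ++ v.toList) (rest.drop 1)
      | none =>
        match d.get? (String.ofList [c]) with
        | some v => pvGoA d (acc ++ v.toList) rest
        | none => pvGoA d (acc ++ [c]) rest
termination_by _ cs => cs.length
decreasing_by
  all_goals simp

def transcribe_text (text : String) (mapping : List (String × String)) : String :=
  String.ofList (pvGoA (PySem.Dict.ofList mapping) [] text.toList)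

-- ===== PORT B =====
-- B: dicts of the 2-char and 1-char keys (a key-preserving dict comprehension
-- over a dict's items is exactly a filter of its item list, keys stay unique),
-- a decision table (piece, step) built for every position, then a walk that
-- follows the steps; ''.join is List.flatten + String.ofList (exact).
def pvEntry (twos ones : PySem.Dict String String) (s : List Char) : List Char × Nat :=
  match twos.get? (String.ofList (s.take 2)) with
  | some v => (v.toList, 2)
  | none => ((ones.getD (String.ofList (s.take 1)) (String.ofList (s.take 1))).toList, 1)

def pvWalk : List (List Char × Nat) → List (List Char)
  | [] => []
  | (piece, step) :: rest => piece :: pvWalk (rest.drop (step - 1))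
termination_by t => t.length
decreasing_by simp

def transcribe_text_alt (text : String) (mapping : List (String × String)) : String :=
  let d := PySem.Dict.ofList mapping
  let twos : PySem.Dict String String := ⟨d.items.filter (fun p => p.1.toList.length == 2)⟩
  let ones : PySem.Dict String String := ⟨d.items.filter (fun p => p.1.toList.length == 1)⟩
  let cs := text.toList
  let table := (List.range cs.length).map (fun i => pvEntry twos ones (cs.drop i))
  String.ofList (pvWalk table).flatten

-- generic find?/filter lemmas

-- ===== PRECONDITION & SPEC =====
def Spec_transcribe_text (text : String) (mapping : List (String × String)) (out : String) : Prop := out = transcribe_text_alt text mapping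
instance (text : String) (mapping : List (String × String)) (out : String) : Decidable (Spec_transcribe_text text mapping out) := by unfold Spec_transcribe_text; infer_instance

-- ===== CLAIM (what is proved, stated in full; the proofs are below) =====
def Claim_equal_transcribe_text : Prop := ∀ (text : String) (mapping : List (String × String)), Dom_transcribe_text text mapping → Spec_transcribe_text text mapping (transcribe_text text mapping)

-- ===== LEMMAS AND PROOFS =====
theorem pv_find_filter {α : Type} (l : List α) (q p : α → Bool)
    (h : ∀ x ∈ l, q x = true → p x = true) :
    (l.filter p).find? q = l.find? q := by
  induction l with
  | nil => rfl
  | cons a t ih =>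
    by_cases hq : q a = true
    · have hp := h a (by simp) hq
      simp [List.filter, hp, List.find?, hq]
    · simp only [Bool.not_eq_true] at hq
      by_cases hp : p a = true
      · simp [List.filter, hp, List.find?, hq, ih (fun x hx => h x (by simp [hx]))]
      · simp only [Bool.not_eq_true] at hp
        simp [List.filter, hp, List.find?, hq, ih (fun x hx => h x (by simp [hx]))]

theorem pv_find_filter_none {α : Type} (l : List α) (q p : α → Bool)
    (h : ∀ x ∈ l, p x = true → q x = false) :
    (l.filter p).find? q = none := by
  apply List.find?_eq_none.mpr
  intro x hx
  simp only [List.mem_filter] at hx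
  simp [h x hx.1 hx.2]

def pvSTab (twos ones : PySem.Dict String String) : List Char → List (List Char × Nat)
  | [] => []
  | c :: rest => pvEntry twos ones (c :: rest) :: pvSTab twos ones rest

theorem pv_table_eq (twos ones : PySem.Dict String String) (cs : List Char) :
    (List.range cs.length).map (fun i => pvEntry twos ones (cs.drop i))
      = pvSTab twos ones cs := by
  induction cs with
  | nil => rfl
  | cons c rest ih =>
    simp only [List.length_cons, List.range_succ_eq_map, List.map_cons, List.map_map]
    simp only [List.drop_zero, pvSTab]
    rw [← ih]
    rfl

theorem pvGoA_nil (d : PySem.Dict String String) (acc : List Char) :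
    pvGoA d acc [] = acc := by rw [pvGoA.eq_def]

theorem pvGoA_cons (d : PySem.Dict String String) (acc : List Char) (c : Char) (rest : List Char) :
    pvGoA d acc (c :: rest) =
      match d.get? (String.ofList (c :: rest.take 1)) with
      | some v => pvGoA d (acc ++ v.toList) (rest.drop 1)
      | none =>
        match d.get? (String.ofList [c]) with
        | some v => pvGoA d (acc ++ v.toList) rest
        | none => pvGoA d (acc ++ [c]) rest
    := by rw [pvGoA.eq_def]

theorem pvGoA_acc_aux (d : PySem.Dict String String) :
    ∀ (n : Nat) (cs : List Char), cs.length ≤ n → ∀ acc, pvGoA d acc cs = acc ++ pvGoA d [] cs := by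
  intro n
  induction n with
  | zero =>
    intro cs hcs acc
    have : cs = [] := List.eq_nil_of_length_eq_zero (Nat.le_zero.mp hcs)
    subst this; simp [pvGoA_nil]
  | succ n ih =>
    intro cs hcs acc
    cases cs with
    | nil => simp [pvGoA_nil]
    | cons c rest =>
      rw [pvGoA_cons, pvGoA_cons d [] c rest]
      simp only [List.length_cons, Nat.succ_le_succ_iff] at hcs
      cases hv : d.get? (String.ofList (c :: rest.take 1)) with
      | some v =>
        dsimp only
        rw [ih (rest.drop 1) (by simp; omega) (acc ++ v.toList),
            ih (rest.drop 1) (by simp; omega) ([] ++ v.toList)]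
        simp
      | none =>
        cases hv2 : d.get? (String.ofList [c]) with
        | some v =>
          dsimp only
          rw [ih rest hcs (acc ++ v.toList), ih rest hcs ([] ++ v.toList)]
          simp
        | none =>
          dsimp only
          rw [ih rest hcs (acc ++ [c]), ih rest hcs ([] ++ [c])]
          simp

theorem pvGoA_acc (d : PySem.Dict String String) (acc cs : List Char) :
    pvGoA d acc cs = acc ++ pvGoA d [] cs :=
  pvGoA_acc_aux d cs.length cs (Nat.le_refl _) acc

theorem pvSTab_cons (t o : PySem.Dict String String) (c : Char) (rest : List Char) :
    pvSTab t o (c :: rest) = pvEntry t o (c :: rest) :: pvSTab t o rest := rfl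

theorem pvWalk_nil : pvWalk [] = [] := by rw [pvWalk.eq_def]

theorem pvWalk_cons (p : List Char) (s : Nat) (rest : List (List Char × Nat)) :
    pvWalk ((p, s) :: rest) = p :: pvWalk (rest.drop (s - 1)) := by rw [pvWalk.eq_def]

theorem pv_get_two (d : PySem.Dict String String) (k : String) (hk : k.toList.length = 2) :
    (PySem.Dict.mk (d.items.filter (fun p => p.1.toList.length == 2)) : PySem.Dict String String).get? k
      = d.get? k := by
  simp only [PySem.Dict.get?]
  rw [pv_find_filter]
  intro x _ hx
  have : x.1 = k := eq_of_beq hx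
  simp [this, hk]

theorem pv_get_two_none (d : PySem.Dict String String) (k : String) (hk : k.toList.length = 1) :
    (PySem.Dict.mk (d.items.filter (fun p => p.1.toList.length == 2)) : PySem.Dict String String).get? k
      = none := by
  have h : (d.items.filter (fun p => p.1.toList.length == 2)).find? (fun p => p.1 == k) = none := by
    apply pv_find_filter_none
    intro x _ hx
    simp only [beq_iff_eq] at hx
    rw [beq_eq_false_iff_ne]
    intro he
    rw [he, hk] at hx
    omega
  simp only [PySem.Dict.get?, h, Option.map_none]

theorem pv_get_one (d : PySem.Dict String String) (k : String) (hk : k.toList.length = 1) :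
    (PySem.Dict.mk (d.items.filter (fun p => p.1.toList.length == 1)) : PySem.Dict String String).get? k
      = d.get? k := by
  simp only [PySem.Dict.get?]
  rw [pv_find_filter]
  intro x _ hx
  have : x.1 = k := eq_of_beq hx
  simp [this, hk]

theorem pv_main (d : PySem.Dict String String) :
    ∀ (n : Nat) (cs : List Char), cs.length ≤ n →
      (pvWalk (pvSTab (PySem.Dict.mk (d.items.filter (fun p => p.1.toList.length == 2)))
                       (PySem.Dict.mk (d.items.filter (fun p => p.1.toList.length == 1))) cs)).flatten
        = pvGoA d [] cs := by
  intro n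
  induction n with
  | zero =>
    intro cs hcs
    have : cs = [] := List.eq_nil_of_length_eq_zero (Nat.le_zero.mp hcs)
    subst this
    simp [pvSTab, pvWalk_nil, pvGoA_nil]
  | succ n ih =>
    intro cs hcs
    cases cs with
    | nil => simp [pvSTab, pvWalk_nil, pvGoA_nil]
    | cons c rest =>
      simp only [List.length_cons, Nat.succ_le_succ_iff] at hcs
      rw [pvSTab_cons]
      simp only [pvEntry, List.take_zero, List.take_succ_cons]
      rw [pvGoA_cons]
      cases rest with
      | nil =>
        simp only [List.take_nil]
        rw [pv_get_two_none d (String.ofList [c]) (by simp)]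
        have hone := pv_get_one d (String.ofList [c]) (by simp)
        simp only [PySem.Dict.getD, hone]
        cases hv : d.get? (String.ofList [c]) with
        | some v =>
          simp [pvWalk_cons, pvSTab, pvWalk_nil, pvGoA_nil]
        | none =>
          simp [pvWalk_cons, pvSTab, pvWalk_nil, pvGoA_nil]
      | cons c2 rest2 =>
        rw [pv_get_two d (String.ofList (c :: List.take 1 (c2 :: rest2))) (by simp)]
        cases hv : d.get? (String.ofList (c :: List.take 1 (c2 :: rest2))) with
        | some v =>
          dsimp only
          rw [pvWalk_cons]
          simp only [pvSTab_cons, List.drop_succ_cons, List.drop_zero, List.flatten_cons]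
          rw [ih rest2 (by simp at hcs; omega)]
          simpa using (pvGoA_acc d v.toList rest2).symm
        | none =>
          dsimp only
          have hone := pv_get_one d (String.ofList [c]) (by simp)
          simp only [PySem.Dict.getD, hone]
          rw [pvWalk_cons]
          simp only [Nat.sub_self, List.drop_zero, List.flatten_cons]
          rw [ih (c2 :: rest2) hcs]
          cases hv2 : d.get? (String.ofList [c]) with
          | some v =>
            simp only [Option.getD_some]
            simpa using (pvGoA_acc d v.toList (c2 :: rest2)).symm
          | none =>
            simp only [Option.getD_none]
            simpa using (pvGoA_acc d [c] (c2 :: rest2)).symm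

theorem pv_eq (text : String) (mapping : List (String × String)) :
    transcribe_text text mapping = transcribe_text_alt text mapping := by
  simp only [transcribe_text, transcribe_text_alt]
  rw [pv_table_eq, pv_main _ text.toList.length _ (Nat.le_refl _)]

-- ===== VERDICT (by name: the statement is the Claim_ definition above) =====
theorem transcribe_text_spec : Claim_equal_transcribe_text := by
  intro text mapping _
  exact pv_eq text mapping
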